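-- pv_equiv track=rewrite | github.com/sgvaidyas/C280Day7 | theoinsertlist.py | task4
-- ===== SOURCE A (Python) =====
-- def task4(listA, data, element, before):
--     newList = []
--     added = 0
--     if data not in listA:
--         newList = listA + [element]
--
--     else:
--         for i in listA:
--             if i == data and added != 1:
--                 if before == 1:
--                     newList += [element]
--                     newList += [i]
--                     added = 1
--                 else:
--                     newList += [i]
--                     newList += [element]
--                     added = 1
--             else:
--                 newList += [i]
--     return newList
-- ===== SOURCE B (Python) =====
-- def task4(listA, data, element, before):
--     if data not in listA:
--         return listA + [element]
--     idx = listA.index(data)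
--     if before == 1:
--         return listA[:idx] + [element] + listA[idx:]
--     return listA[:idx + 1] + [element] + listA[idx + 1:]
-- ===== Notes on version B (the rewrite author's own statement) =====
-- stated objective: simpler
-- what changed: Replaced the element-by-element scan with an 'added' flag by a single index lookup followed by slice concatenation.
import Mathlib
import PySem

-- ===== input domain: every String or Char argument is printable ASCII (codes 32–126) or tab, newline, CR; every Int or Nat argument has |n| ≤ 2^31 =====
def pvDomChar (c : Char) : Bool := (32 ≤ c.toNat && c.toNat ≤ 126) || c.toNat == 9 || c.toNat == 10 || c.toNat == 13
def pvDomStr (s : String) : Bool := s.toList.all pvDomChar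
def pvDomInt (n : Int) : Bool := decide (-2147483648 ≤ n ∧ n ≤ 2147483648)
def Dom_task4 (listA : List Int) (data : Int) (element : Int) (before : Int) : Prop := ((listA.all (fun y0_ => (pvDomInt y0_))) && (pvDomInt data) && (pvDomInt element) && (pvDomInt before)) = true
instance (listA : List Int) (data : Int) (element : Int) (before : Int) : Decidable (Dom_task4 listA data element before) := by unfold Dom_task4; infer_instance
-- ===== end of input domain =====

-- B replaces A's scan-with-flag loop by an index lookup plus slice concatenation (objective: simpler).

-- ===== PORT A =====
-- the body of A's for-loop: state = (newList, added)
def task4Step (data element before : Int) (st : List Int × Int) (i : Int) : List Int × Int :=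
  if i = data ∧ st.2 ≠ 1 then
    if before = 1 then (st.1 ++ [element] ++ [i], 1)
    else (st.1 ++ [i] ++ [element], 1)
  else (st.1 ++ [i], st.2)

def task4 (listA : List Int) (data : Int) (element : Int) (before : Int) : List Int :=
  if data ∉ listA then listA ++ [element]
  else (listA.foldl (task4Step data element before) ([], 0)).1

-- ===== PORT B =====
def task4_alt (listA : List Int) (data : Int) (element : Int) (before : Int) : List Int :=
  match PySem.List.index? listA data with
  | none => listA ++ [element]
  | some idx =>
    if before = 1 then
      PySem.List.slice listA none (some (idx : Int)) ++ [element] ++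
        PySem.List.slice listA (some (idx : Int)) none
    else
      PySem.List.slice listA none (some ((idx : Int) + 1)) ++ [element] ++
        PySem.List.slice listA (some ((idx : Int) + 1)) none

-- ===== PRECONDITION & SPEC =====
def Spec_task4 (listA : List Int) (data : Int) (element : Int) (before : Int) (out : List Int) : Prop := out = task4_alt listA data element before
instance (listA : List Int) (data : Int) (element : Int) (before : Int) (out : List Int) : Decidable (Spec_task4 listA data element before out) := by unfold Spec_task4; infer_instance

-- ===== CLAIM (what is proved, stated in full; the proofs are below) =====
def Claim_equal_task4 : Prop := ∀ (listA : List Int) (data : Int) (element : Int) (before : Int), Dom_task4 listA data element before → Spec_task4 listA data element before (task4 listA data element before)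

-- ===== LEMMAS AND PROOFS =====

-- after 'added' is set, the loop just copies the rest
theorem task4Step_done (data element before : Int) (xs acc : List Int) :
    xs.foldl (task4Step data element before) (acc, 1) = (acc ++ xs, 1) := by
  induction xs generalizing acc with
  | nil => simp
  | cons x xs ih => simp [task4Step, ih]

-- before the first occurrence, the loop copies elements unchanged
theorem task4Step_scan (data element before : Int) (pre acc : List Int) (h : data ∉ pre) :
    pre.foldl (task4Step data element before) (acc, 0) = (acc ++ pre, 0) := by
  induction pre generalizing acc with
  | nil => simp
  | cons x xs ih =>
    have hx : x ≠ data := fun hx => h (by simp [hx])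
    rw [List.foldl_cons, show task4Step data element before (acc, 0) x = (acc ++ [x], 0) by
      simp [task4Step, hx], ih _ (fun hm => h (List.mem_cons_of_mem _ hm))]
    simp

-- ===== VERDICT (by name: the statement is the Claim_ definition above) =====
theorem task4_spec : Claim_equal_task4 := by
  intro listA data element before _
  unfold Spec_task4 task4 task4_alt
  rcases hidx : PySem.List.index? listA data with _ | k
  · have hnm : data ∉ listA := (PySem.List.index?_eq_none_iff _ _).mp hidx
    simp [hnm]
  · obtain ⟨pre, suf, hx, hlen, hnp⟩ := (PySem.List.index?_eq_some_iff _ _ _).mp hidx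
    subst hx hlen
    have hm : data ∈ pre ++ data :: suf := by simp
    rw [if_neg (by simp [hm])]
    rw [List.foldl_append, task4Step_scan data element before pre [] hnp]
    rw [List.foldl_cons, show task4Step data element before (([] : List Int) ++ pre, 0) data =
      (if before = 1 then (pre ++ [element] ++ [data], 1) else (pre ++ [data] ++ [element], 1)) by
        by_cases hb : before = 1 <;> simp [task4Step, hb]]
    have h1 : PySem.List.slice (pre ++ data :: suf) none (some ((pre.length : Nat) : Int)) = pre := by
      rw [PySem.List.slice_to_natCast]; simp
    have h2 : PySem.List.slice (pre ++ data :: suf) (some ((pre.length : Nat) : Int)) none = data :: suf := by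
      rw [PySem.List.slice_from_natCast]; simp
    have hcast : ((pre.length : Nat) : Int) + 1 = (((pre.length + 1 : Nat)) : Int) := by push_cast; ring
    have h3 : PySem.List.slice (pre ++ data :: suf) none (some (((pre.length : Nat) : Int) + 1)) = pre ++ [data] := by
      rw [hcast, PySem.List.slice_to_natCast,
        show pre ++ data :: suf = (pre ++ [data]) ++ suf by simp,
        show pre.length + 1 = (pre ++ [data]).length by simp]
      exact List.take_left
    have h4 : PySem.List.slice (pre ++ data :: suf) (some (((pre.length : Nat) : Int) + 1)) none = suf := by
      rw [hcast, PySem.List.slice_from_natCast,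
        show pre ++ data :: suf = (pre ++ [data]) ++ suf by simp,
        show pre.length + 1 = (pre ++ [data]).length by simp]
      exact List.drop_left
    by_cases hb : before = 1
    · rw [if_pos hb, task4Step_done]; simp [hb, h1, h2]
    · rw [if_neg hb, task4Step_done]; simp [hb, h3, h4]
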